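-- pv_equiv track=rewrite | github.com/Krishna-Kumar-Yadav/Python | ex12.py | check
-- ===== SOURCE A (Python) =====
-- def check(a,b):
--     k = a
--     count = 0
--     for i in range(len(a)-1):
--        if a[i] != "*" and a[i+1] == "*":
--           k = k.replace(a[i],'')
--           k = k.replace(a[i+1],'')
--
--
--     for i in k:
--        for j in b:
--           if i == j:
--             count += 1
--
--        if count > 1:
--           return False
--        else:
--           count = 0
--
--     return True
-- ===== SOURCE B (Python) =====
-- def check(a, b):
--     # sort b once; a char repeats in b iff it appears in adjacent positions of sorted(b)
--     bs = sorted(b)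
--     dups = {x for x, y in zip(bs, bs[1:]) if x == y}
--     # chars removed by the star rule
--     drop = {x for x, y in zip(a, a[1:]) if x != "*" and y == "*"}
--     if drop:
--         drop.add("*")
--     # contrapositive check: every char of a that repeats in b must be a dropped one
--     return all(c in drop for c in a if c in dups)
-- ===== Notes on version B (the rewrite author's own statement) =====
-- stated objective: alternative
-- what changed: B replaces A's repeated full-string .replace mutations and the nested per-char scan of b by sorting b once and reading off its repeated characters from adjacent equal pairs, then checks the contrapositive: every character of a that repeats in b must belong to the star-drop set.
import Mathlib
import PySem

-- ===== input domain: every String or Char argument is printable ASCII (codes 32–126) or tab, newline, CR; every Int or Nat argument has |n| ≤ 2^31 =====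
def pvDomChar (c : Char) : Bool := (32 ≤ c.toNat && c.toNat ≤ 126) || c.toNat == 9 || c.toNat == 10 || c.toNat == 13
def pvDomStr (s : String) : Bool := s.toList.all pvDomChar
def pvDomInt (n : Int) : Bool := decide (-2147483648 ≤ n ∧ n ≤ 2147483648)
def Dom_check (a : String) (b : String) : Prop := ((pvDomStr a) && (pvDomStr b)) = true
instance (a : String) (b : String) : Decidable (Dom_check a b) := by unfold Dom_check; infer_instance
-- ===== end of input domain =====

-- B sorts b once and reads its repeated characters off adjacent equal pairs, then checks
-- the contrapositive: every character of a that repeats in b must be star-dropped.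

-- ===== PORT A =====
-- inner Python loop: for i in k: count occurrences of i in b; return False if > 1
def checkALoop (bl : List Char) : List Char → Bool
  | [] => true
  | i :: rest =>
      let count : Int := bl.foldl (fun acc j => if i == j then acc + 1 else acc) 0
      if count > 1 then false else checkALoop bl rest

def check (a : String) (b : String) : Bool :=
  let al := a.toList
  -- for i in range(len(a)-1): if a[i] != "*" and a[i+1] == "*": k = k.replace(a[i],'').replace(a[i+1],'')
  let k := (List.range (al.length - 1)).foldl (fun k i =>
      if !(al.getD i ' ' == '*') && (al.getD (i+1) ' ' == '*') then
        (k.filter (fun c => !(c == al.getD i ' '))).filter (fun c => !(c == al.getD (i+1) ' '))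
      else k) al
  checkALoop b.toList k

-- ===== PORT B =====
def check_alt (a : String) (b : String) : Bool :=
  -- bs = sorted(b)
  let bs := PySem.List.sorted b.toList (fun c => c) false
  -- dups = {x for (x, y) in zip(bs, bs[1:]) if x == y}
  let dups : PySem.Set Char := (bs.zip bs.tail).foldl
      (fun s p => if p.1 == p.2 then PySem.Set.add s p.1 else s) PySem.Set.empty
  let al := a.toList
  -- drop = {x for (x, y) in zip(a, a[1:]) if x != "*" and y == "*"}
  let drop0 : PySem.Set Char := (al.zip al.tail).foldl
      (fun s p => if !(p.1 == '*') && (p.2 == '*') then PySem.Set.add s p.1 else s)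
      PySem.Set.empty
  -- if drop: drop.add("*")
  let drop := if drop0.isEmpty then drop0 else PySem.Set.add drop0 '*'
  -- all(c in drop for c in a if c in dups)
  (al.filter (fun c => PySem.Set.contains dups c)).all (fun c => PySem.Set.contains drop c)

-- ===== PRECONDITION & SPEC =====
def Spec_check (a : String) (b : String) (out : Bool) : Prop := out = check_alt a b
instance (a : String) (b : String) (out : Bool) : Decidable (Spec_check a b out) := by unfold Spec_check; infer_instance

-- ===== CLAIM (what is proved, stated in full; the proofs are below) =====
def Claim_equal_check : Prop := ∀ (a : String) (b : String), Dom_check a b → Spec_check a b (check a b)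

-- ===== LEMMAS AND PROOFS =====

-- the trigger condition of step i, on the original list al
def trigB (al : List Char) (i : Nat) : Bool :=
  !(al.getD i ' ' == '*') && (al.getD (i+1) ' ' == '*')

-- survival predicate accumulated by A's replace loop over index list is
def survP (al : List Char) (is : List Nat) (c : Char) : Bool :=
  is.all (fun i => if trigB al i then !(c == al.getD i ' ') && !(c == '*') else true)

lemma foldA_eq_filter (al : List Char) (is : List Nat) (k : List Char) :
    is.foldl (fun k i =>
      if !(al.getD i ' ' == '*') && (al.getD (i+1) ' ' == '*') then
        (k.filter (fun c => !(c == al.getD i ' '))).filter (fun c => !(c == al.getD (i+1) ' '))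
      else k) k = k.filter (survP al is) := by
  induction is generalizing k with
  | nil =>
      have hp : survP al [] = fun _ => true := by funext c; simp [survP]
      simp [hp]
  | cons i is ih =>
      simp only [List.foldl_cons]
      have hcond : (!(al.getD i ' ' == '*') && (al.getD (i+1) ' ' == '*')) = trigB al i := rfl
      rw [hcond]
      cases htr : trigB al i with
      | true =>
          have hstar : al.getD (i+1) ' ' = '*' := by
            have h2 := htr
            simp [trigB, Bool.and_eq_true] at h2
            exact h2.2
          rw [if_pos rfl, hstar, ih, List.filter_filter, List.filter_filter]
          apply List.filter_congr
          intro c _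
          rw [Bool.eq_iff_iff]
          simp only [survP, List.all_cons, htr, if_true, Bool.and_eq_true]
          tauto
      | false =>
          rw [if_neg (by simp), ih]
          apply List.filter_congr
          intro c _
          rw [Bool.eq_iff_iff]
          simp [survP, htr]

-- membership in a conditionally-built set fold
lemma mem_foldl_add_if {α β : Type} [BEq α] [LawfulBEq α] (g : β → Bool) (h : β → α)
    (l : List β) (s : PySem.Set α) (y : α) :
    y ∈ l.foldl (fun s p => if g p then PySem.Set.add s (h p) else s) s ↔
      y ∈ s ∨ ∃ p ∈ l, g p ∧ y = h p := by
  induction l generalizing s with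
  | nil => simp
  | cons p l ih =>
      simp only [List.foldl_cons]
      by_cases hg : g p
      · rw [if_pos hg, ih]
        simp only [PySem.Set.mem_add, List.mem_cons]
        constructor
        · rintro ((hy | rfl) | ⟨q, hq, hgq, rfl⟩)
          · exact Or.inl hy
          · exact Or.inr ⟨p, Or.inl rfl, hg, rfl⟩
          · exact Or.inr ⟨q, Or.inr hq, hgq, rfl⟩
        · rintro (hy | ⟨q, (rfl | hq), hgq, rfl⟩)
          · exact Or.inl (Or.inl hy)
          · exact Or.inl (Or.inr rfl)
          · exact Or.inr ⟨q, hq, hgq, rfl⟩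
      · rw [if_neg hg, ih]
        simp only [List.mem_cons]
        constructor
        · rintro (hy | ⟨q, hq, hgq, rfl⟩)
          · exact Or.inl hy
          · exact Or.inr ⟨q, Or.inr hq, hgq, rfl⟩
        · rintro (hy | ⟨q, (rfl | hq), hgq, rfl⟩)
          · exact Or.inl hy
          · exact absurd hgq hg
          · exact Or.inr ⟨q, hq, hgq, rfl⟩

-- pairs of zip l l.tail are exactly consecutive pairs by index
lemma mem_zip_tail (al : List Char) (p : Char × Char) :
    p ∈ al.zip al.tail ↔ ∃ i, i + 1 < al.length ∧ p = (al.getD i ' ', al.getD (i+1) ' ') := by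
  constructor
  · intro hp
    rw [List.mem_iff_getElem] at hp
    obtain ⟨i, hi, he⟩ := hp
    have hlen : i + 1 < al.length := by
      have := hi
      simp [List.length_zip, List.length_tail] at this
      omega
    refine ⟨i, hlen, ?_⟩
    rw [← he]
    have h1 : i < al.length := by omega
    have h2 : i < al.tail.length := by simp [List.length_tail]; omega
    simp [List.getElem_zip, List.getElem_tail, List.getD_eq_getElem?_getD,
      List.getElem?_eq_getElem h1, List.getElem?_eq_getElem hlen]
  · rintro ⟨i, hi, rfl⟩
    rw [List.mem_iff_getElem]
    have h1 : i < al.length := by omega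
    have hz : i < (al.zip al.tail).length := by
      simp [List.length_zip, List.length_tail]; omega
    refine ⟨i, hz, ?_⟩
    have h2 : i < al.tail.length := by simp [List.length_tail]; omega
    simp [List.getElem_zip, List.getElem_tail, List.getD_eq_getElem?_getD,
      List.getElem?_eq_getElem h1, List.getElem?_eq_getElem hi]

-- existence of a trigger pair, as used on both sides
def hasTrig (al : List Char) : Prop :=
  ∃ i, i + 1 < al.length ∧ trigB al i = true

lemma survP_range_iff (al : List Char) (c : Char) :
    survP al (List.range (al.length - 1)) c = true ↔
      ∀ i, i + 1 < al.length → trigB al i = true → (c ≠ al.getD i ' ' ∧ c ≠ '*') := by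
  simp only [survP, List.all_eq_true, List.mem_range]
  constructor
  · intro h i hi ht
    have := h i (by omega)
    simp [ht] at this
    exact this
  · intro h i hi
    by_cases ht : trigB al i
    · simp [ht]
      exact h i (by omega) ht
    · simp [ht]

lemma drop0_mem (al : List Char) (c : Char) :
    c ∈ (al.zip al.tail).foldl
      (fun s p => if !(p.1 == '*') && (p.2 == '*') then PySem.Set.add s p.1 else s)
      PySem.Set.empty ↔
      ∃ i, i + 1 < al.length ∧ trigB al i = true ∧ c = al.getD i ' ' := by
  rw [mem_foldl_add_if]
  simp only [PySem.Set.empty, List.not_mem_nil, false_or]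
  constructor
  · rintro ⟨p, hp, hg, rfl⟩
    rw [mem_zip_tail] at hp
    obtain ⟨i, hi, rfl⟩ := hp
    exact ⟨i, hi, by simpa [trigB] using hg, rfl⟩
  · rintro ⟨i, hi, ht, rfl⟩
    refine ⟨(al.getD i ' ', al.getD (i+1) ' '), ?_, by simpa [trigB] using ht, rfl⟩
    rw [mem_zip_tail]; exact ⟨i, hi, rfl⟩

-- A's survival predicate equals B's "not in drop" predicate
lemma surv_eq_not_drop (al : List Char) (c : Char) :
    survP al (List.range (al.length - 1)) c =
      !(PySem.Set.contains
        (if ((al.zip al.tail).foldl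
              (fun s p => if !(p.1 == '*') && (p.2 == '*') then PySem.Set.add s p.1 else s)
              PySem.Set.empty).isEmpty then
            ((al.zip al.tail).foldl
              (fun s p => if !(p.1 == '*') && (p.2 == '*') then PySem.Set.add s p.1 else s)
              PySem.Set.empty)
          else PySem.Set.add
            ((al.zip al.tail).foldl
              (fun s p => if !(p.1 == '*') && (p.2 == '*') then PySem.Set.add s p.1 else s)
              PySem.Set.empty) '*') c) := by
  set d0 := (al.zip al.tail).foldl
      (fun s p => if !(p.1 == '*') && (p.2 == '*') then PySem.Set.add s p.1 else s)
      PySem.Set.empty with hd0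
  by_cases hem : d0.isEmpty
  · -- no trigger exists: every char survives, and drop is the empty set
    rw [if_pos hem]
    have hnil : d0 = [] := List.isEmpty_iff.1 hem
    have hno : ¬ hasTrig al := by
      rintro ⟨i, hi, ht⟩
      have hmem : al.getD i ' ' ∈ d0 := by
        rw [hd0, drop0_mem]; exact ⟨i, hi, ht, rfl⟩
      rw [hnil] at hmem
      exact List.not_mem_nil hmem
    have h1 : survP al (List.range (al.length - 1)) c = true := by
      rw [survP_range_iff]
      intro i hi ht
      exact absurd ⟨i, hi, ht⟩ hno
    rw [h1, hnil]
    simp [PySem.Set.contains]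
  · -- some trigger exists: drop = d0 ∪ {'*'}
    rw [if_neg hem]
    have hyes : hasTrig al := by
      rw [List.isEmpty_iff] at hem
      rcases List.exists_mem_of_ne_nil d0 hem with ⟨x, hx⟩
      rw [hd0, drop0_mem] at hx
      obtain ⟨i, hi, ht, _⟩ := hx
      exact ⟨i, hi, ht⟩
    rw [Bool.eq_iff_iff, survP_range_iff]
    constructor
    · intro hall
      have hnotmem : c ∉ PySem.Set.add d0 '*' := by
        rw [PySem.Set.mem_add]
        rintro (hin | rfl)
        · rw [hd0, drop0_mem] at hin
          obtain ⟨i, hi, ht, hceq⟩ := hin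
          exact (hall i hi ht).1 hceq
        · obtain ⟨i, hi, ht⟩ := hyes
          exact (hall i hi ht).2 rfl
      have hcf : (PySem.Set.add d0 '*').contains c = false := by
        rw [Bool.eq_false_iff]
        intro hct
        exact hnotmem ((PySem.Set.contains_iff _ _).1 hct)
      rw [hcf]
      rfl
    · intro hnc i hi ht
      have hnotmem : c ∉ PySem.Set.add d0 '*' := by
        intro hm
        rw [← PySem.Set.contains_iff] at hm
        rw [hm] at hnc
        exact absurd hnc (by simp)
      rw [PySem.Set.mem_add] at hnotmem
      constructor
      · intro hceq
        exact hnotmem (Or.inl (by rw [hd0, drop0_mem]; exact ⟨i, hi, ht, hceq⟩))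
      · intro hceq
        exact hnotmem (Or.inr hceq)

lemma checkALoop_eq_all (bl k : List Char) :
    checkALoop bl k = k.all (fun c => decide ((bl.count c : Int) ≤ 1)) := by
  induction k with
  | nil => simp [checkALoop]
  | cons i rest ih =>
      simp only [checkALoop, List.all_cons]
      have hsw : (fun (acc : Int) j => if i == j then acc + 1 else acc) =
          (fun (acc : Int) j => if j == i then acc + 1 else acc) := by
        funext acc j
        by_cases h : i = j
        · subst h; rfl
        · simp [h, Ne.symm h]
      rw [hsw, PySem.List.foldl_beq_add_one, zero_add]
      by_cases h : (1 : Int) < (bl.count i : Int)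
      · simp [h, not_le.mpr h]
      · simp [h, not_lt.mp h, ih]

-- membership in the dups set built over zip bs bs.tail
lemma dups_mem (bs : List Char) (c : Char) :
    c ∈ (bs.zip bs.tail).foldl
      (fun s p => if p.1 == p.2 then PySem.Set.add s p.1 else s) PySem.Set.empty ↔
      ∃ i, i + 1 < bs.length ∧ bs.getD i ' ' = bs.getD (i+1) ' ' ∧ c = bs.getD i ' ' := by
  rw [mem_foldl_add_if]
  simp only [PySem.Set.empty, List.not_mem_nil, false_or]
  constructor
  · rintro ⟨p, hp, hg, rfl⟩
    rw [mem_zip_tail] at hp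
    obtain ⟨i, hi, rfl⟩ := hp
    exact ⟨i, hi, by simpa using hg, rfl⟩
  · rintro ⟨i, hi, ht, rfl⟩
    refine ⟨(bs.getD i ' ', bs.getD (i+1) ' '), ?_, by simpa using ht, rfl⟩
    rw [mem_zip_tail]; exact ⟨i, hi, rfl⟩

-- in a sorted (pairwise ≤) list, a duplicate yields an adjacent equal pair
lemma adj_of_sublist_pair (bs : List Char) (c : Char)
    (hp : bs.Pairwise (· ≤ ·)) (hs : List.Sublist [c, c] bs) :
    ∃ i, i + 1 < bs.length ∧ bs.getD i ' ' = c ∧ bs.getD (i+1) ' ' = c := by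
  induction bs with
  | nil => cases hs
  | cons x rest ih =>
      rcases List.pairwise_cons.1 hp with ⟨hx, hrest⟩
      cases hs with
      | cons _ htail =>
          obtain ⟨i, hi, h1, h2⟩ := ih hrest htail
          exact ⟨i + 1, by simpa using hi, by simpa using h1, by simpa using h2⟩
      | cons₂ _ hsub =>
          have hc : c ∈ rest := (List.singleton_sublist.1 hsub)
          cases rest with
          | nil => cases hc
          | cons r0 rest' =>
              rcases List.pairwise_cons.1 hrest with ⟨hr0, _⟩
              have hle1 : c ≤ r0 := hx r0 (List.mem_cons_self)
              have hle2 : r0 ≤ c := by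
                rcases List.mem_cons.1 hc with rfl | hmem
                · exact le_refl _
                · exact hr0 c hmem
              have : r0 = c := le_antisymm hle2 hle1
              exact ⟨0, by simp, rfl, by simpa using this⟩

-- an adjacent equal pair is a [c,c] sublist
lemma sublist_pair_of_adj (bs : List Char) (c : Char) (i : Nat)
    (hi : i + 1 < bs.length) (h1 : bs.getD i ' ' = c) (h2 : bs.getD (i+1) ' ' = c) :
    List.Sublist [c, c] bs := by
  have hlt : i < bs.length := by omega
  have hd : bs.drop i = bs[i] :: bs[i+1] :: bs.drop (i+2) := by
    rw [List.drop_eq_getElem_cons hlt, List.drop_eq_getElem_cons hi]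
  have hg1 : bs[i] = c := by
    rw [← h1]; simp [List.getD_eq_getElem?_getD, List.getElem?_eq_getElem hlt]
  have hg2 : bs[i+1] = c := by
    rw [← h2]; simp [List.getD_eq_getElem?_getD, List.getElem?_eq_getElem hi]
  have hsub : List.Sublist [c, c] (bs.drop i) := by
    rw [hd, hg1, hg2]
    exact (List.nil_sublist _).cons₂ c |>.cons₂ c
  exact hsub.trans (List.drop_sublist i bs)

-- character c is in B's dups set iff it occurs at least twice in b
lemma dups_iff_count (bl : List Char) (c : Char) :
    c ∈ ((PySem.List.sorted bl (fun c => c) false).zip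
          (PySem.List.sorted bl (fun c => c) false).tail).foldl
      (fun s p => if p.1 == p.2 then PySem.Set.add s p.1 else s) PySem.Set.empty ↔
      2 ≤ bl.count c := by
  set bs := PySem.List.sorted bl (fun c => c) false with hbs
  have hperm : bs.Perm bl := PySem.List.sorted_perm bl (fun c => c) false
  have hpair : bs.Pairwise (· ≤ ·) := by
    have := PySem.List.sorted_pairwise bl (fun c => c)
    simpa using this
  rw [dups_mem]
  constructor
  · rintro ⟨i, hi, heq, rfl⟩
    have hsub : List.Sublist [bs.getD i ' ', bs.getD i ' '] bs :=
      sublist_pair_of_adj bs (bs.getD i ' ') i hi rfl heq.symm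
    have hdup : List.Duplicate (bs.getD i ' ') bs := List.duplicate_iff_sublist.2 hsub
    have := List.duplicate_iff_two_le_count.1 hdup
    rwa [hperm.count_eq] at this
  · intro hcnt
    have hcnt' : 2 ≤ bs.count c := by rwa [hperm.count_eq]
    have hdup : List.Duplicate c bs := List.duplicate_iff_two_le_count.2 hcnt'
    obtain ⟨i, hi, h1, h2⟩ := adj_of_sublist_pair bs c hpair (List.duplicate_iff_sublist.1 hdup)
    exact ⟨i, hi, by rw [h1, h2], h1.symm⟩

-- ===== VERDICT (by name: the statement is the Claim_ definition above) =====
theorem check_spec : Claim_equal_check := by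
  intro a b _
  unfold Spec_check check check_alt
  simp only []
  rw [foldA_eq_filter, checkALoop_eq_all]
  rw [Bool.eq_iff_iff]
  simp only [List.all_eq_true, List.mem_filter, and_imp, decide_eq_true_eq]
  constructor
  · intro h c hcmem hdups
    have hd := (dups_iff_count b.toList c).1 ((PySem.Set.contains_iff _ _).1 hdups)
    by_cases hs : survP a.toList (List.range (a.toList.length - 1)) c = true
    · have := h c hcmem hs
      exfalso
      have : (2 : Int) ≤ (b.toList.count c : Int) := by exact_mod_cast hd
      omega
    · have := surv_eq_not_drop a.toList c
      rw [this] at hs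
      simp only [Bool.not_eq_true, Bool.not_eq_false'] at hs
      exact hs
  · intro h c hcmem hs
    by_contra hgt
    push_neg at hgt
    have hcnt : 2 ≤ b.toList.count c := by
      have : (1 : Int) < (b.toList.count c : Int) := hgt
      exact_mod_cast this
    have hdups : PySem.Set.contains _ c = true :=
      (PySem.Set.contains_iff _ _).2 ((dups_iff_count b.toList c).2 hcnt)
    have hdrop := h c hcmem hdups
    rw [surv_eq_not_drop a.toList c, hdrop] at hs
    simp at hs
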